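-- pv_equiv track=rewrite | github.com/gendestus/daphnetv | app/scheduler/ad_insertion.py | _round_robin_ads
-- ===== SOURCE A (Python) =====
-- def _round_robin_ads(
--     inventory: list[dict],
--     count: int,
--     start_index: int = 0,
-- ) -> list[dict]:
--     """Select ads using round-robin from start_index."""
--     if not inventory:
--         return []
--     selected: list[dict] = []
--     for i in range(count):
--         selected.append(inventory[(start_index + i) % len(inventory)])
--     return selected
-- ===== SOURCE B (Python) =====
-- def _round_robin_ads(
--     inventory: list[dict],
--     count: int,
--     start_index: int = 0,
-- ) -> list[dict]:
--     """Select ads using round-robin from start_index."""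
--     if not inventory or count <= 0:
--         return []
--     n = len(inventory)
--     r = start_index % n
--     rotated = inventory[r:] + inventory[:r]
--     return (rotated * (count // n + 1))[:count]
-- ===== Notes on version B (the rewrite author's own statement) =====
-- stated objective: alternative
-- what changed: Replaces the per-element modulo-indexed append loop with a closed-form construction: rotate the inventory once by start_index % n, repeat it count // n + 1 times and take a single prefix slice of length count.
import Mathlib
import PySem

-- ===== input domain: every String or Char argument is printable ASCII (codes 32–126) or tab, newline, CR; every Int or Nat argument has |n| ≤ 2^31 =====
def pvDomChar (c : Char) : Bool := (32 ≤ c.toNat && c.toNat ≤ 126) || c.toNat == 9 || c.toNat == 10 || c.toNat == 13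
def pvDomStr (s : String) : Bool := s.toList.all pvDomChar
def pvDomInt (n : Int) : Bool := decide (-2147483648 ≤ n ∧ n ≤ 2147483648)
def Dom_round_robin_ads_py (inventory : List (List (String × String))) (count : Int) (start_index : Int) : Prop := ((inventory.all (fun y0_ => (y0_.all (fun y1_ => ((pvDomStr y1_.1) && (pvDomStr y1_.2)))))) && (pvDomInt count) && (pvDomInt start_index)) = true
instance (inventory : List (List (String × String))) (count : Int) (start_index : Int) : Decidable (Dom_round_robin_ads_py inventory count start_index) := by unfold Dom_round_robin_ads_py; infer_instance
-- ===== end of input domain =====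

-- B builds the result by one rotation, list repetition and a prefix slice instead of A's modulo-indexed append loop (objective: alternative).
-- ===== PORT A =====
def round_robin_ads_py (inventory : List (List (String × String))) (count : Int) (start_index : Int) : List (List (String × String)) :=
  if inventory = [] then []
  else
    (PySem.List.pyRange 0 count 1).foldl
      (fun selected i =>
        selected ++ [PySem.List.pyGetD inventory (PySem.Int.mod (start_index + i) (inventory.length : Int)) []])
      []

-- ===== PORT B =====
def round_robin_ads_py_alt (inventory : List (List (String × String))) (count : Int) (start_index : Int) : List (List (String × String)) :=
  if inventory = [] ∨ count ≤ 0 then []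
  else
    let n : Int := (inventory.length : Int)
    let r : Int := PySem.Int.mod start_index n
    let rotated := PySem.List.slice inventory (some r) none ++ PySem.List.slice inventory none (some r)
    ((List.replicate (PySem.Int.floordiv count n + 1).toNat rotated).flatten).take count.toNat

-- ===== PRECONDITION & SPEC =====
def Spec_round_robin_ads_py (inventory : List (List (String × String))) (count : Int) (start_index : Int) (out : List (List (String × String))) : Prop := out = round_robin_ads_py_alt inventory count start_index
instance (inventory : List (List (String × String))) (count : Int) (start_index : Int) (out : List (List (String × String))) : Decidable (Spec_round_robin_ads_py inventory count start_index out) := by unfold Spec_round_robin_ads_py; infer_instance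

-- ===== CLAIM (what is proved, stated in full; the proofs are below) =====
def Claim_equal_round_robin_ads_py : Prop := ∀ (inventory : List (List (String × String))) (count : Int) (start_index : Int), Dom_round_robin_ads_py inventory count start_index → Spec_round_robin_ads_py inventory count start_index (round_robin_ads_py inventory count start_index)

-- ===== LEMMAS AND PROOFS =====

-- ===== VERDICT (by name: the statement is the Claim_ definition above) =====
-- flatten of replicated xs, indexed: cycles through xs
lemma flatten_replicate_getElem {α : Type} (xs : List α) (m j : Nat)
    (hx : xs ≠ []) (hj : j < m * xs.length)
    (h : j < ((List.replicate m xs).flatten).length) :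
    ((List.replicate m xs).flatten)[j] = xs[j % xs.length]'(Nat.mod_lt _ (List.length_pos_of_ne_nil hx)) := by
  induction m generalizing j with
  | zero => omega
  | succ m ih =>
    simp only [List.replicate_succ, List.flatten_cons]
    by_cases hlt : j < xs.length
    · rw [List.getElem_append_left hlt]
      congr 1
      exact (Nat.mod_eq_of_lt hlt).symm
    · have hlen : xs.length ≤ j := by omega
      have hml : (m + 1) * xs.length = m * xs.length + xs.length := by ring
      have hfl : ((List.replicate m xs).flatten).length = m * xs.length := by
        simp [List.length_flatten, List.map_replicate]
      rw [List.getElem_append_right hlen]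
      have h2 : j - xs.length < ((List.replicate m xs).flatten).length := by
        rw [hfl]; omega
      rw [ih (j - xs.length) (by omega) h2]
      congr 1
      conv_rhs => rw [show j = (j - xs.length) + 1 * xs.length by omega]
      rw [Nat.add_mul_mod_self_right]

lemma rotated_getElem {α : Type} (xs : List α) (r k : Nat) (hr : r ≤ xs.length)
    (hk : k < xs.length)
    (h : k < (xs.drop r ++ xs.take r).length)
    (h2 : (r + k) % xs.length < xs.length) :
    (xs.drop r ++ xs.take r)[k] = xs[(r + k) % xs.length] := by
  by_cases hlt : k < xs.length - r
  · rw [List.getElem_append_left (by simp; omega)]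
    rw [List.getElem_drop]
    congr 1
    rw [Nat.mod_eq_of_lt (by omega)]
  · rw [List.getElem_append_right (by simp; omega)]
    rw [List.getElem_take]
    congr 1
    have hd : (xs.drop r).length = xs.length - r := by simp
    rw [hd]
    conv_rhs => rw [show r + k = (k - (xs.length - r)) + 1 * xs.length by omega]
    rw [Nat.add_mul_mod_self_right, Nat.mod_eq_of_lt (by omega)]


-- A's loop, characterised as a map over range
lemma A_char (inventory : List (List (String × String))) (count start_index : Int)
    (hinv : inventory ≠ []) :
    round_robin_ads_py inventory count start_index =
      (PySem.List.pyRange 0 count 1).map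
        (fun i => PySem.List.pyGetD inventory (PySem.Int.mod (start_index + i) (inventory.length : Int)) []) := by
  unfold round_robin_ads_py
  rw [if_neg hinv]
  simpa using PySem.List.foldl_append_singleton_eq_map (fun i => PySem.List.pyGetD inventory (PySem.Int.mod (start_index + i) (inventory.length : Int)) []) (PySem.List.pyRange 0 count 1) []

-- ===== VERDICT (by name: the statement is the Claim_ definition above) =====
theorem round_robin_ads_py_spec : Claim_equal_round_robin_ads_py := by
  unfold Claim_equal_round_robin_ads_py Spec_round_robin_ads_py
  intro inventory count start_index _
  by_cases hinv : inventory = []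
  · subst hinv
    simp [round_robin_ads_py, round_robin_ads_py_alt]
  · by_cases hc : count ≤ 0
    · rw [A_char _ _ _ hinv, PySem.List.pyRange_one_eq_nil (by omega)]
      simp [round_robin_ads_py_alt, hc]
    · -- main case: inventory ≠ [], 0 < count
      push Not at hc
      have hn : 0 < (inventory.length : Int) := by
        simpa using List.length_pos_of_ne_nil hinv
      have hnN : 0 < inventory.length := List.length_pos_of_ne_nil hinv
      rw [A_char _ _ _ hinv]
      simp only [round_robin_ads_py_alt]
      rw [if_neg (by push Not; exact ⟨hinv, hc⟩)]
      -- name the pieces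
      set n : Int := (inventory.length : Int) with hn_def
      set r : Int := PySem.Int.mod start_index n with hr_def
      have hr0 : 0 ≤ r := PySem.Int.mod_nonneg _ hn
      have hrlt : r < n := PySem.Int.mod_lt _ hn
      set rN : Nat := r.toNat with hrN_def
      have hrN_le : rN ≤ inventory.length := by omega
      rw [PySem.List.slice_from inventory hr0, PySem.List.slice_to inventory hr0]
      have hrotlen : (inventory.drop rN ++ inventory.take rN).length = inventory.length := by
        simp; omega
      have hrotne : inventory.drop rN ++ inventory.take rN ≠ [] := by
        intro h; rw [h] at hrotlen; simp at hrotlen; omega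
      set m : Nat := (PySem.Int.floordiv count n + 1).toNat with hm_def
      have hfd : PySem.Int.floordiv count n = count / n :=
        PySem.Int.floordiv_eq_ediv_of_pos hn
      have hq0 : 0 ≤ count / n := Int.ediv_nonneg (by omega) (by omega)
      have hmeq : (m : Int) = count / n + 1 := by
        rw [hm_def, hfd]; exact Int.toNat_of_nonneg (by omega)
      have hlt2 : count < (count / n + 1) * n := by
        have h2 := Int.mul_ediv_add_emod count n
        have h3 := Int.emod_lt_of_pos count hn
        nlinarith
      have hcm : count.toNat ≤ m * inventory.length := by
        have key : ((count.toNat : Int)) ≤ ((m * inventory.length : Nat) : Int) := by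
          calc ((count.toNat : Int)) = count := Int.toNat_of_nonneg (by omega)
            _ ≤ (m : Int) * n := by rw [hmeq]; exact le_of_lt hlt2
            _ = ((m * inventory.length : Nat) : Int) := by rw [hn_def]; push_cast; ring
        exact_mod_cast key
      have hflat : ((List.replicate m (inventory.drop rN ++ inventory.take rN)).flatten).length
          = m * inventory.length := by
        simp only [List.length_flatten, List.map_replicate, List.sum_replicate, hrotlen,
          smul_eq_mul]
      apply List.ext_getElem
      · rw [List.length_take, hflat, List.length_map, PySem.List.length_pyRange_one]
        omega
      · intro j hj1 hj2
        have hjc : j < count.toNat := by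
          rw [List.length_map, PySem.List.length_pyRange_one] at hj1; omega
        have hjf : j < ((List.replicate m (inventory.drop rN ++ inventory.take rN)).flatten).length := by
          rw [hflat]; omega
        rw [List.getElem_take,
          flatten_replicate_getElem (inventory.drop rN ++ inventory.take rN) m j hrotne
            (by rw [hrotlen]; omega) hjf]
        simp only [hrotlen]
        rw [List.getElem_map, PySem.List.getElem_pyRange_one]
        have hidx : PySem.Int.mod (start_index + (0 + (j : Int))) n
            = (((rN + j % inventory.length) % inventory.length : Nat) : Int) := by
          rw [PySem.Int.mod_eq_emod_of_pos hn]
          have hrr : r = start_index % n := PySem.Int.mod_eq_emod_of_pos hn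
          have hstep : (start_index + (0 + (j : Int))) % n = (r + (j : Int)) % n := by
            rw [hrr, zero_add, Int.add_emod start_index (j : Int) n,
              Int.add_emod (start_index % n) (j : Int) n, Int.emod_emod_of_dvd _ (dvd_refl n)]
          rw [hstep]
          have hreq : r = (rN : Int) := by omega
          rw [hreq, hn_def]
          push_cast
          rw [Int.add_emod ((rN : Int)) _ _]
          conv_rhs => rw [Int.add_emod]
          rw [Int.emod_emod_of_dvd _ (dvd_refl _)]
        rw [hidx, PySem.List.pyGetD_natCast]
        have hlt3 : (rN + j % inventory.length) % inventory.length < inventory.length :=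
          Nat.mod_lt _ hnN
        rw [List.getD_eq_getElem _ _ hlt3]
        rw [rotated_getElem inventory rN (j % inventory.length) hrN_le
          (Nat.mod_lt _ hnN) (by rw [hrotlen]; exact Nat.mod_lt _ hnN) hlt3]
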